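-- pv_equiv track=rewrite | github.com/q10/bioe243 | bioe243/target1/genetic_lattice.py | dir_dim_change
-- ===== SOURCE A (Python) =====
-- def dir_dim_change(curr,next):
--     for i in range(len(curr)):
--         if curr[i]!=next[i]:
--             dim = i
--             if next[i]>curr[i]:
--                 dir = 1
--             else:
--                 dir = -1
--     return dir,dim
-- ===== SOURCE B (Python) =====
-- def dir_dim_change(curr, next):
--     # Scan from the end and return at the first (i.e. last) differing index.
--     for i in reversed(range(len(curr))):
--         if curr[i] != next[i]:
--             return ((1 if next[i] > curr[i] else -1), i)
--     raise ValueError("no differing dimension")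
-- ===== Notes on version B (the rewrite author's own statement) =====
-- stated objective: simpler
-- what changed: Replaces A's full forward scan that keeps overwriting dir/dim with a reverse scan that returns immediately at the last differing index (so the loop exits early instead of always running to the end).
import Mathlib
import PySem

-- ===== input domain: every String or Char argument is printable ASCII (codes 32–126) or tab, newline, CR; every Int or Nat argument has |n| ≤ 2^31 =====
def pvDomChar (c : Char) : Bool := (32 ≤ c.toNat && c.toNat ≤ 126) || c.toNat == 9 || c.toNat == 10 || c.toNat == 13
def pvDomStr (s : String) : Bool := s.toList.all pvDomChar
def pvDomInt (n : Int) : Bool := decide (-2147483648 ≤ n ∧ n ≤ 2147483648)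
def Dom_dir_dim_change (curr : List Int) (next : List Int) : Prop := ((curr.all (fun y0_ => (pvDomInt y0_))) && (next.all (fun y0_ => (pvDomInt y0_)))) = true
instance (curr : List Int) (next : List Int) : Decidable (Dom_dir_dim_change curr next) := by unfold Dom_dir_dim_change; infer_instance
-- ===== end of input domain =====

-- B replaces A's full forward scan (overwriting dir/dim) with a reverse scan returning at the last differing index; objective: simpler.


-- ===== PORT A =====
-- loop state: (dir?, dim?) — none = the Python variable is still unbound
def dir_dim_change (curr : List Int) (next : List Int) : Int × Int :=
  let st := (PySem.List.pyRange 0 (curr.length : Int) 1).foldl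
    (fun (s : Option Int × Option Int) (i : Int) =>
      if PySem.List.pyGetD curr i 0 ≠ PySem.List.pyGetD next i 0 then
        (if PySem.List.pyGetD next i 0 > PySem.List.pyGetD curr i 0 then (some 1, some i)
         else (some (-1), some i))
      else s)
    (none, none)
  ((st.1).getD 0, (st.2).getD 0)  -- unbound at return = UnboundLocalError, excluded by Pre_

-- ===== PORT B =====
-- reversed(range(len(curr))) with an early return; the base case is Python B's
-- 'raise ValueError', unreachable under Pre_
def dir_dim_change_altGo (curr : List Int) (next : List Int) : Nat → Int × Int
  | 0 => (0, 0)
  | k + 1 =>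
      if PySem.List.pyGetD curr (k : Int) 0 ≠ PySem.List.pyGetD next (k : Int) 0 then
        ((if PySem.List.pyGetD next (k : Int) 0 > PySem.List.pyGetD curr (k : Int) 0 then 1 else -1),
         (k : Int))
      else dir_dim_change_altGo curr next k

def dir_dim_change_alt (curr : List Int) (next : List Int) : Int × Int :=
  dir_dim_change_altGo curr next curr.length

-- ===== PRECONDITION & SPEC =====
-- A raises IndexError when next is shorter than curr, and UnboundLocalError when
-- the compared prefixes are identical; exactly those inputs are excluded.
def Pre_dir_dim_change (curr : List Int) (next : List Int) : Prop :=
  curr.length ≤ next.length ∧ curr ≠ next.take curr.length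
instance (curr : List Int) (next : List Int) : Decidable (Pre_dir_dim_change curr next) := by
  unfold Pre_dir_dim_change; infer_instance

def pvWitness_dir_dim_change : List Int × List Int := ([0, 3], [0, 5])

def Spec_dir_dim_change (curr : List Int) (next : List Int) (out : Int × Int) : Prop := out = dir_dim_change_alt curr next
instance (curr : List Int) (next : List Int) (out : Int × Int) : Decidable (Spec_dir_dim_change curr next out) := by unfold Spec_dir_dim_change; infer_instance

-- ===== CLAIM (what is proved, stated in full; the proofs are below) =====
def Claim_equal_dir_dim_change : Prop := ∀ (curr : List Int) (next : List Int), Dom_dir_dim_change curr next → Pre_dir_dim_change curr next → Spec_dir_dim_change curr next (dir_dim_change curr next)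

-- ===== LEMMAS AND PROOFS =====

-- A's fold equals (none,none) when the first n entries agree, else the some-wrapped
-- result of B's reverse scan over the first n entries.
lemma fold_eq_altGo (curr next : List Int) : ∀ n : Nat,
    (PySem.List.pyRange 0 (n : Int) 1).foldl
      (fun (s : Option Int × Option Int) (i : Int) =>
        if PySem.List.pyGetD curr i 0 ≠ PySem.List.pyGetD next i 0 then
          (if PySem.List.pyGetD next i 0 > PySem.List.pyGetD curr i 0 then (some 1, some i)
           else (some (-1), some i))
        else s)
      (none, none)
    = if ∃ k < n, curr.getD k 0 ≠ next.getD k 0 then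
        (some (dir_dim_change_altGo curr next n).1, some (dir_dim_change_altGo curr next n).2)
      else (none, none) := by
  intro n
  induction n with
  | zero => simp [PySem.List.pyRange_one_eq_nil]
  | succ n ih =>
      have hsplit : PySem.List.pyRange 0 ((n + 1 : Nat) : Int) 1
          = PySem.List.pyRange 0 (n : Int) 1 ++ [(n : Int)] := by
        push_cast
        exact PySem.List.pyRange_one_succ_right (by positivity)
      rw [hsplit, List.foldl_append, ih]
      by_cases hd : curr.getD n 0 ≠ next.getD n 0
      · have hex : ∃ k < n + 1, curr.getD k 0 ≠ next.getD k 0 := ⟨n, by omega, hd⟩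
        simp only [List.foldl, dir_dim_change_altGo, PySem.List.pyGetD_natCast, if_pos hex]
        split_ifs with h1 <;> simp_all
      · push Not at hd
        have hiff : (∃ k < n + 1, curr.getD k 0 ≠ next.getD k 0)
            ↔ (∃ k < n, curr.getD k 0 ≠ next.getD k 0) := by
          constructor
          · rintro ⟨k, hk, hne⟩
            rcases Nat.lt_succ_iff_lt_or_eq.mp hk with h | rfl
            · exact ⟨k, h, hne⟩
            · exact absurd hd hne
          · rintro ⟨k, hk, hne⟩; exact ⟨k, by omega, hne⟩
        simp only [List.foldl, dir_dim_change_altGo, PySem.List.pyGetD_natCast, hd, hiff]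
        split_ifs <;> simp_all

lemma pre_gives_diff (curr next : List Int)
    (h : Pre_dir_dim_change curr next) :
    ∃ k < curr.length, curr.getD k 0 ≠ next.getD k 0 := by
  obtain ⟨hlen, hne⟩ := h
  by_contra hall
  push Not at hall
  apply hne
  apply List.ext_getElem
  · simp; omega
  · intro k hk hk'
    have := hall k hk
    simp only [List.getD_eq_getElem?_getD, List.getElem?_eq_getElem hk] at this
    have hkn : k < next.length := by omega
    rw [List.getElem?_eq_getElem hkn] at this
    simpa [List.getElem_take] using this

-- ===== VERDICT (by name: the statement is the Claim_ definition above) =====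
theorem dir_dim_change_spec : Claim_equal_dir_dim_change := by
  intro curr next _ hpre
  unfold Spec_dir_dim_change dir_dim_change dir_dim_change_alt
  rw [fold_eq_altGo, if_pos (pre_gives_diff curr next hpre)]
  simp
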